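-- pv_equiv track=rewrite | github.com/CobbyCode/fxroute | samplerate.py | _select_relevant_sink
-- ===== SOURCE A (Python) =====
-- from typing import Any
--
-- def _select_relevant_sink(default_sink: dict[str, Any], sinks: list[dict[str, Any]]) -> dict[str, Any] | None:
--     if not sinks:
--         return None
--
--     running = [sink for sink in sinks if sink.get("state") == "RUNNING"]
--     default_name = default_sink.get("name") if default_sink else None
--
--     if default_name:
--         for sink in running:
--             if sink.get("name") == default_name:
--                 return sink
--
--     for sink in running:
--         if sink.get("name") == "easyeffects_sink":
--             return sink
--
--     if running:
--         return running[0]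
--
--     if default_name:
--         for sink in sinks:
--             if sink.get("name") == default_name:
--                 return sink
--
--     return sinks[0]
-- ===== SOURCE B (Python) =====
-- from typing import Any
--
-- def _select_relevant_sink(default_sink: dict[str, Any], sinks: list[dict[str, Any]]) -> dict[str, Any] | None:
--     if not sinks:
--         return None
--
--     running = [sink for sink in sinks if sink.get("state") == "RUNNING"]
--     default_name = default_sink.get("name") if default_sink else None
--
--     def rank(sink):
--         name = sink.get("name")
--         if default_name and name == default_name:
--             return 0
--         if name == "easyeffects_sink":
--             return 1
--         return 2
--
--     if running:
--         return min(running, key=rank)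
--
--     if default_name:
--         for sink in sinks:
--             if sink.get("name") == default_name:
--                 return sink
--
--     return sinks[0]
-- ===== Notes on version B (the rewrite author's own statement) =====
-- stated objective: simpler
-- what changed: The three sequential scans over `running` with early returns are replaced by a single stable min() over a 3-level priority rank (default name = 0, easyeffects_sink = 1, other = 2), with the non-running fallback in its own branch.
import Mathlib
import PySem

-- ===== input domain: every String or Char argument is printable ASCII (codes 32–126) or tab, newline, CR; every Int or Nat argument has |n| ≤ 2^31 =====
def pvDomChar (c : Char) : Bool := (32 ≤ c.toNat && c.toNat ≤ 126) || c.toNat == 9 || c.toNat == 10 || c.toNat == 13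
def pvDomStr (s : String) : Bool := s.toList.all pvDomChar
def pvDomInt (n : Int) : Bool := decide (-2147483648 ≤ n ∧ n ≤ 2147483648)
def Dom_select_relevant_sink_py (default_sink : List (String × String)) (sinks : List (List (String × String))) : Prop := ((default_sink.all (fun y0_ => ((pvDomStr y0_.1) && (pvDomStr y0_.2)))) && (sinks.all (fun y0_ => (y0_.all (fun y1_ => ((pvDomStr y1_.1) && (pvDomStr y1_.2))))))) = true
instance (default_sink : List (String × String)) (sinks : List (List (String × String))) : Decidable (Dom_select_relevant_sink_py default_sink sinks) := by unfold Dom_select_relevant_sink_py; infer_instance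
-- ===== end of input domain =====

-- B replaces A's three sequential scans over the running sinks by one stable min over a
-- 3-level priority rank; same O(n) cost, fewer branches (objective: simpler).


-- shared primitive helpers: Python dict.get(k) (first-match lookup on the assoc list) and truthiness of a str|None
def dGet (d : List (String × String)) (k : String) : Option String := (PySem.Dict.mk d).get? k
def pyTruthyStr : Option String → Bool
  | none => false
  | some s => !(s == "")

-- ===== PORT A =====
def select_relevant_sink_py (default_sink : List (String × String)) (sinks : List (List (String × String))) : Option (List (String × String)) :=
  if sinks = [] then none
  else
    let running := sinks.filter (fun sink => dGet sink "state" == some "RUNNING")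
    let default_name : Option String := if default_sink = [] then none else dGet default_sink "name"
    match (if pyTruthyStr default_name then running.find? (fun sink => dGet sink "name" == default_name) else none) with
    | some sink => some sink
    | none =>
      match running.find? (fun sink => dGet sink "name" == some "easyeffects_sink") with
      | some sink => some sink
      | none =>
        match running with
        | sink :: _ => some sink
        | [] =>
          match (if pyTruthyStr default_name then sinks.find? (fun sink => dGet sink "name" == default_name) else none) with
          | some sink => some sink
          | none => PySem.List.pyGet? sinks 0

-- ===== PORT B =====
-- Source B's rank(sink): 0 = the (truthy) default name, 1 = easyeffects_sink, 2 = anything else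
def rankB (default_name : Option String) (sink : List (String × String)) : Int :=
  if pyTruthyStr default_name && (dGet sink "name" == default_name) then 0
  else if dGet sink "name" == some "easyeffects_sink" then 1
  else 2

def select_relevant_sink_py_alt (default_sink : List (String × String)) (sinks : List (List (String × String))) : Option (List (String × String)) :=
  if sinks = [] then none
  else
    let running := sinks.filter (fun sink => dGet sink "state" == some "RUNNING")
    let default_name : Option String := if default_sink = [] then none else dGet default_sink "name"
    if running ≠ [] then
      PySem.List.min? running (rankB default_name)
    else if pyTruthyStr default_name then
      match sinks.find? (fun sink => dGet sink "name" == default_name) with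
      | some sink => some sink
      | none => PySem.List.pyGet? sinks 0
    else PySem.List.pyGet? sinks 0

-- ===== PRECONDITION & SPEC =====
def Spec_select_relevant_sink_py (default_sink : List (String × String)) (sinks : List (List (String × String))) (out : Option (List (String × String))) : Prop := out = select_relevant_sink_py_alt default_sink sinks
instance (default_sink : List (String × String)) (sinks : List (List (String × String))) (out : Option (List (String × String))) : Decidable (Spec_select_relevant_sink_py default_sink sinks out) := by unfold Spec_select_relevant_sink_py; infer_instance

-- ===== CLAIM (what is proved, stated in full; the proofs are below) =====
def Claim_equal_select_relevant_sink_py : Prop := ∀ (default_sink : List (String × String)) (sinks : List (List (String × String))), Dom_select_relevant_sink_py default_sink sinks → Spec_select_relevant_sink_py default_sink sinks (select_relevant_sink_py default_sink sinks)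

-- ===== LEMMAS AND PROOFS =====

-- the predicate of A's first scan (guarded by truthiness) and of A's second scan
def P0 (dn : Option String) (sink : List (String × String)) : Bool :=
  pyTruthyStr dn && (dGet sink "name" == dn)
def P1 (sink : List (String × String)) : Bool :=
  dGet sink "name" == some "easyeffects_sink"

lemma rankB_eq (dn : Option String) (s : List (String × String)) :
    rankB dn s = if P0 dn s then 0 else if P1 s then 1 else 2 := rfl

-- min? over a nonempty list is a plain foldl keeping the first strict minimum
lemma min?_cons (key : List (String × String) → Int) (m : List (String × String))
    (t : List (List (String × String))) :
    PySem.List.min? (m :: t) key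
      = some (t.foldl (fun acc x => if key x < key acc then x else acc) m) := by
  show List.foldl _ (some m) t = _
  induction t generalizing m with
  | nil => rfl
  | cons x t ih =>
      simp only [List.foldl_cons]
      split
      · exact ih x
      · exact ih m

-- A's guarded first scan is an unguarded scan with predicate P0
lemma ifTruthy_find (dn : Option String) (xs : List (List (String × String))) :
    (if pyTruthyStr dn then xs.find? (fun sink => dGet sink "name" == dn) else none)
      = xs.find? (P0 dn) := by
  by_cases h : pyTruthyStr dn = true
  · simp only [h, if_pos]
    congr 1
    funext s
    simp [P0, h]
  · simp only [Bool.not_eq_true] at h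
    rw [if_neg (by simp [h])]
    symm
    rw [List.find?_eq_none]
    intro x _
    simp [P0, h]
-- the crux: the first-min foldl over t starting from champion m equals A's scan chain over m :: t
lemma foldl_min_eq_scan (dn : Option String) (t : List (List (String × String)))
    (m : List (String × String)) :
    t.foldl (fun acc x => if rankB dn x < rankB dn acc then x else acc) m
      = (match (m :: t).find? (P0 dn) with
         | some z => z
         | none =>
           match (m :: t).find? P1 with
           | some z => z
           | none => m) := by
  induction t generalizing m with
  | nil =>
      cases h0 : P0 dn m <;> cases h1 : P1 m <;> simp [List.find?, h0, h1]
  | cons x t ih =>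
      rw [List.foldl_cons, ih]
      cases h0m : P0 dn m <;> cases h0x : P0 dn x <;> cases h1m : P1 m <;> cases h1x : P1 x <;>
        simp [List.find?, rankB_eq, h0m, h0x, h1m, h1x]

-- ===== VERDICT (by name: the statement is the Claim_ definition above) =====
theorem select_relevant_sink_py_spec : Claim_equal_select_relevant_sink_py := by
  intro default_sink sinks _
  unfold Spec_select_relevant_sink_py select_relevant_sink_py select_relevant_sink_py_alt
  by_cases hs : sinks = []
  · simp [hs]
  · simp only [if_neg hs]
    rw [ifTruthy_find]
    cases hr : sinks.filter (fun sink => dGet sink "state" == some "RUNNING") with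
    | nil =>
        simp only [List.find?_nil, ne_eq, not_true_eq_false, if_false]
        by_cases ht : pyTruthyStr (if default_sink = [] then none else dGet default_sink "name") = true
        · simp only [ht, if_pos]
        · simp only [Bool.not_eq_true] at ht
          simp [ht]
    | cons m t =>
        simp only [ne_eq, reduceCtorEq, not_false_eq_true, if_true,
          show (fun sink : List (String × String) => dGet sink "name" == some "easyeffects_sink") = P1 from rfl]
        rw [min?_cons, foldl_min_eq_scan]
        cases ((m :: t).find? (P0 (if default_sink = [] then none else dGet default_sink "name"))) <;>
          cases ((m :: t).find? P1) <;> simp
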